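-- pv_equiv track=rewrite | github.com/pkch93/Algorithm | Beakjoon_Online_Judge/color_paper_ad.py | solution
-- ===== SOURCE A (Python) =====
-- dx = [0, 0, -1, 1]
--
-- dy = [-1, 1, 0, 0]
--
-- def solution(arr):
--     answer = 0
--     big_paper = [[0 for _ in range(100)] for _ in range(100)]
--     for x, y in arr:
--         for i in range(y, y+10):
--             for j in range(x, x+10):
--                 big_paper[i][j] = 1
--     for i in range(100):
--         for j in range(100):
--             if big_paper[i][j] == 1:
--                 for k in range(4):
--                     ny = dy[k] + i
--                     nx = dx[k] + j
--                     if 0 <= ny < 100 and 0 <= nx < 100\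
--                             and big_paper[ny][nx] == 0:
--                         answer += 1
--     return answer
-- ===== SOURCE B (Python) =====
-- def solution(arr):
--     big_paper = [[0] * 100 for _ in range(100)]
--     for x, y in arr:
--         for i in range(y, y + 10):
--             for j in range(x, x + 10):
--                 big_paper[i][j] = 1
--     answer = 0
--     for i in range(100):
--         for j in range(99):
--             if big_paper[i][j] != big_paper[i][j + 1]:
--                 answer += 1
--     for i in range(99):
--         for j in range(100):
--             if big_paper[i][j] != big_paper[i + 1][j]:
--                 answer += 1
--     return answer
-- ===== Notes on version B (the rewrite author's own statement) =====
-- stated objective: simpler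
-- what changed: The per-cell scan over the dx/dy direction tables with in-bounds neighbour checks is replaced by two plain adjacency scans counting differing horizontal and vertical cell pairs, which removes the direction tables and the bounds test entirely.
import Mathlib
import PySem

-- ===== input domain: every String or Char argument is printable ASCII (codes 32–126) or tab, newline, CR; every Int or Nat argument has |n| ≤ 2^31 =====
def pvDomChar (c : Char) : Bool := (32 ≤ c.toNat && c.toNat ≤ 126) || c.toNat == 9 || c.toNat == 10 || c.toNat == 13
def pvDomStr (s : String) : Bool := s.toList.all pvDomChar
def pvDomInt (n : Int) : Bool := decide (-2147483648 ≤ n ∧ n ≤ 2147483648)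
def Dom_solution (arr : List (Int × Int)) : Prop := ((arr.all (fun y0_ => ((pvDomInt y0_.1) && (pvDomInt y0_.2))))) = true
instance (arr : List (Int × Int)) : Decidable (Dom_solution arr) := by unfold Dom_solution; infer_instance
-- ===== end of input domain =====

-- B replaces A's per-cell 4-direction dx/dy neighbour scan with two adjacent-pair scans
-- (horizontal pairs, then vertical pairs); same grid build, same return value (objective: simpler).

-- ===== PORT A =====
def pvDx : List Int := [0, 0, -1, 1]
def pvDy : List Int := [-1, 1, 0, 0]

-- exact model of `big_paper[i][j] = 1` for -100 ≤ i, j < 100: Python's negative-index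
-- wraparound is `emod 100` there (Pre_solution keeps all written indices in that range)
def pvSet (M : List (List Int)) (i j : Int) : List (List Int) :=
  M.set (i.emod 100).toNat ((M.getD (i.emod 100).toNat []).set (j.emod 100).toNat 1)

def pvBuild (arr : List (Int × Int)) : List (List Int) :=
  arr.foldl (fun M p =>
    (PySem.List.pyRange p.2 (p.2 + 10) 1).foldl (fun M i =>
      (PySem.List.pyRange p.1 (p.1 + 10) 1).foldl (fun M j => pvSet M i j) M) M)
    (List.replicate 100 (List.replicate 100 0))

-- cell read `big_paper[a][b]`; exact for the in-range non-negative indices the counting loops use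
def pvGrid (M : List (List Int)) : Int → Int → Int :=
  fun a b => (M.getD a.toNat []).getD b.toNat 0

def pvCountA (g : Int → Int → Int) : Int :=
  (List.range 100).foldl (fun acc (i : Nat) =>
    (List.range 100).foldl (fun acc (j : Nat) =>
      if g (i : Int) (j : Int) = 1 then
        (List.range 4).foldl (fun acc (k : Nat) =>
          let ny := PySem.List.pyGetD pvDy (k : Int) 0 + (i : Int)
          let nx := PySem.List.pyGetD pvDx (k : Int) 0 + (j : Int)
          if 0 ≤ ny ∧ ny < 100 ∧ 0 ≤ nx ∧ nx < 100 ∧ g ny nx = 0 then acc + 1 else acc) acc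
      else acc) acc) 0

def solution (arr : List (Int × Int)) : Int := pvCountA (pvGrid (pvBuild arr))

-- ===== PORT B =====
def pvCountH (g : Int → Int → Int) : Int :=
  (List.range 100).foldl (fun acc (i : Nat) =>
    (List.range 99).foldl (fun acc (j : Nat) =>
      if g (i : Int) (j : Int) ≠ g (i : Int) ((j : Int) + 1) then acc + 1 else acc) acc) 0

def pvCountV (g : Int → Int → Int) : Int :=
  (List.range 99).foldl (fun acc (i : Nat) =>
    (List.range 100).foldl (fun acc (j : Nat) =>
      if g (i : Int) (j : Int) ≠ g ((i : Int) + 1) (j : Int) then acc + 1 else acc) acc) 0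

def solution_alt (arr : List (Int × Int)) : Int :=
  pvCountH (pvGrid (pvBuild arr)) + pvCountV (pvGrid (pvBuild arr))

-- ===== PRECONDITION & SPEC =====
-- Pre_ excludes exactly the inputs on which Python A raises IndexError: a stamp with a
-- coordinate above 90 (runs past row/column 99) or below -100 (negative index out of range).
def Pre_solution (arr : List (Int × Int)) : Prop :=
  ∀ p ∈ arr, -100 ≤ p.1 ∧ p.1 ≤ 90 ∧ -100 ≤ p.2 ∧ p.2 ≤ 90
instance (arr : List (Int × Int)) : Decidable (Pre_solution arr) := by
  unfold Pre_solution; infer_instance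

def pvWitness_solution : (List (Int × Int)) := [(0, 0), (85, 90), (-5, -100)]

def Spec_solution (arr : List (Int × Int)) (out : Int) : Prop := out = solution_alt arr
instance (arr : List (Int × Int)) (out : Int) : Decidable (Spec_solution arr out) := by
  unfold Spec_solution; infer_instance

-- ===== CLAIM (what is proved, stated in full; the proofs are below) =====
def Claim_equal_solution : Prop :=
  ∀ (arr : List (Int × Int)), Dom_solution arr → Pre_solution arr → Spec_solution arr (solution arr)

-- ===== LEMMAS AND PROOFS =====

-- every entry of the built matrix is 0 or 1
def pvInv (M : List (List Int)) : Prop := ∀ row ∈ M, ∀ x ∈ row, x = 0 ∨ x = 1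

lemma pvInv_set (M : List (List Int)) (i j : Int) (h : pvInv M) : pvInv (pvSet M i j) := by
  intro row hrow x hx
  rcases List.mem_or_eq_of_mem_set hrow with hrow' | hrow'
  · exact h row hrow' x hx
  · subst hrow'
    rcases List.mem_or_eq_of_mem_set hx with hx' | hx'
    · rw [List.getD_eq_getElem?_getD] at hx'
      cases hg : (M[(i.emod 100).toNat]? : Option (List Int)) with
      | none => rw [hg] at hx'; simp at hx'
      | some row0 =>
          rw [hg] at hx'
          exact h row0 (List.mem_of_getElem? hg) x hx'
    · exact Or.inr hx'

lemma pvBuild_inv (arr : List (Int × Int)) : pvInv (pvBuild arr) := by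
  unfold pvBuild
  refine List.foldlRecOn (motive := pvInv) arr _ ?_ ?_
  · intro row hrow x hx
    rw [List.eq_of_mem_replicate hrow] at hx
    exact Or.inl (List.eq_of_mem_replicate hx)
  · intro M hM p _
    refine List.foldlRecOn (motive := pvInv) _ _ hM ?_
    intro M hM i _
    refine List.foldlRecOn (motive := pvInv) _ _ hM ?_
    intro M hM j _
    exact pvInv_set M i j hM

lemma pvGrid_zero_one (M : List (List Int)) (h : pvInv M) :
    ∀ a b, pvGrid M a b = 0 ∨ pvGrid M a b = 1 := by
  intro a b
  unfold pvGrid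
  simp only [List.getD_eq_getElem?_getD]
  cases hg : (M[a.toNat]? : Option (List Int)) with
  | none => simp
  | some row =>
      simp only [Option.getD_some]
      cases hr : (row[b.toNat]? : Option Int) with
      | none => simp
      | some x =>
          simp only [Option.getD_some]
          exact h row (List.mem_of_getElem? hg) x (List.mem_of_getElem? hr)

-- fold of (acc + f i) over List.range is a Finset sum
lemma foldl_addf (n : Nat) (f : Nat → Int) :
    ∀ a : Int, (List.range n).foldl (fun acc i => acc + f i) a = a + ∑ i ∈ Finset.range n, f i := by
  induction n with
  | zero => intro a; simp
  | succ n ih =>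
      intro a
      rw [List.range_succ, List.foldl_append, ih, Finset.sum_range_succ]
      simp [add_assoc]

-- one directed boundary indicator of A, per direction (dy, dx)
def aT (g : Int → Int → Int) (dy dx : Int) (i j : Nat) : Int :=
  if g (i : Int) (j : Int) = 1 ∧ 0 ≤ dy + (i : Int) ∧ dy + (i : Int) < 100
      ∧ 0 ≤ dx + (j : Int) ∧ dx + (j : Int) < 100
      ∧ g (dy + (i : Int)) (dx + (j : Int)) = 0 then 1 else 0

lemma kfold_eq (g : Int → Int → Int) (i j : Nat) (acc : Int) (h : g (i : Int) (j : Int) = 1) :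
    (List.range 4).foldl (fun acc (k : Nat) =>
      let ny := PySem.List.pyGetD pvDy (k : Int) 0 + (i : Int)
      let nx := PySem.List.pyGetD pvDx (k : Int) 0 + (j : Int)
      if 0 ≤ ny ∧ ny < 100 ∧ 0 ≤ nx ∧ nx < 100 ∧ g ny nx = 0 then acc + 1 else acc) acc
    = acc + (aT g (-1) 0 i j + aT g 1 0 i j + aT g 0 (-1) i j + aT g 0 1 i j) := by
  have h4 : List.range 4 = [0, 1, 2, 3] := rfl
  rw [h4]
  have d0 : PySem.List.pyGetD pvDy (((0:Nat)) : Int) 0 = -1 := rfl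
  have d1 : PySem.List.pyGetD pvDy (((1:Nat)) : Int) 0 = 1 := rfl
  have d2 : PySem.List.pyGetD pvDy (((2:Nat)) : Int) 0 = 0 := rfl
  have d3 : PySem.List.pyGetD pvDy (((3:Nat)) : Int) 0 = 0 := rfl
  have e0 : PySem.List.pyGetD pvDx (((0:Nat)) : Int) 0 = 0 := rfl
  have e1 : PySem.List.pyGetD pvDx (((1:Nat)) : Int) 0 = 0 := rfl
  have e2 : PySem.List.pyGetD pvDx (((2:Nat)) : Int) 0 = -1 := rfl
  have e3 : PySem.List.pyGetD pvDx (((3:Nat)) : Int) 0 = 1 := rfl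
  simp only [List.foldl_cons, List.foldl_nil, d0, d1, d2, d3, e0, e1, e2, e3, aT, h, true_and]
  split_ifs <;> ring

lemma countA_eq (g : Int → Int → Int) :
    pvCountA g = ∑ i ∈ Finset.range 100, ∑ j ∈ Finset.range 100,
      (aT g (-1) 0 i j + aT g 1 0 i j + aT g 0 (-1) i j + aT g 0 1 i j) := by
  unfold pvCountA
  have hin : ∀ i : Nat, (fun (acc : Int) (j : Nat) =>
      if g (i : Int) (j : Int) = 1 then
        (List.range 4).foldl (fun acc (k : Nat) =>
          let ny := PySem.List.pyGetD pvDy (k : Int) 0 + (i : Int)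
          let nx := PySem.List.pyGetD pvDx (k : Int) 0 + (j : Int)
          if 0 ≤ ny ∧ ny < 100 ∧ 0 ≤ nx ∧ nx < 100 ∧ g ny nx = 0 then acc + 1 else acc) acc
      else acc)
      = fun acc (j : Nat) => acc + (aT g (-1) 0 i j + aT g 1 0 i j + aT g 0 (-1) i j + aT g 0 1 i j) := by
    intro i; funext acc j
    by_cases h : g (i : Int) (j : Int) = 1
    · rw [if_pos h, kfold_eq g i j acc h]
    · rw [if_neg h]
      have hz : ∀ dy dx, aT g dy dx i j = 0 := by
        intro dy dx; unfold aT; rw [if_neg]; rintro ⟨h1, -⟩; exact h h1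
      rw [hz, hz, hz, hz]; ring
  have hout : (fun (acc : Int) (i : Nat) =>
      (List.range 100).foldl (fun (acc : Int) (j : Nat) =>
        if g (i : Int) (j : Int) = 1 then
          (List.range 4).foldl (fun acc (k : Nat) =>
            let ny := PySem.List.pyGetD pvDy (k : Int) 0 + (i : Int)
            let nx := PySem.List.pyGetD pvDx (k : Int) 0 + (j : Int)
            if 0 ≤ ny ∧ ny < 100 ∧ 0 ≤ nx ∧ nx < 100 ∧ g ny nx = 0 then acc + 1 else acc) acc
        else acc) acc)
      = fun acc (i : Nat) => acc + ∑ j ∈ Finset.range 100,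
          (aT g (-1) 0 i j + aT g 1 0 i j + aT g 0 (-1) i j + aT g 0 1 i j) := by
    funext acc i
    rw [hin i, foldl_addf]
  rw [hout, foldl_addf, zero_add]

lemma countH_eq (g : Int → Int → Int) :
    pvCountH g = ∑ i ∈ Finset.range 100, ∑ j ∈ Finset.range 99,
      (if g (i : Int) (j : Int) ≠ g (i : Int) ((j : Int) + 1) then (1 : Int) else 0) := by
  unfold pvCountH
  have hin : ∀ i : Nat, (fun (acc : Int) (j : Nat) =>
      if g (i : Int) (j : Int) ≠ g (i : Int) ((j : Int) + 1) then acc + 1 else acc)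
      = fun acc (j : Nat) => acc + (if g (i : Int) (j : Int) ≠ g (i : Int) ((j : Int) + 1) then (1:Int) else 0) := by
    intro i; funext acc j
    by_cases hc : g (i : Int) (j : Int) ≠ g (i : Int) ((j : Int) + 1) <;> simp [hc]
  have hout : (fun (acc : Int) (i : Nat) =>
      (List.range 99).foldl (fun (acc : Int) (j : Nat) =>
        if g (i : Int) (j : Int) ≠ g (i : Int) ((j : Int) + 1) then acc + 1 else acc) acc)
      = fun acc (i : Nat) => acc + ∑ j ∈ Finset.range 99,
          (if g (i : Int) (j : Int) ≠ g (i : Int) ((j : Int) + 1) then (1:Int) else 0) := by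
    funext acc i
    rw [hin i, foldl_addf]
  rw [hout, foldl_addf, zero_add]

lemma countV_eq (g : Int → Int → Int) :
    pvCountV g = ∑ i ∈ Finset.range 99, ∑ j ∈ Finset.range 100,
      (if g (i : Int) (j : Int) ≠ g ((i : Int) + 1) (j : Int) then (1 : Int) else 0) := by
  unfold pvCountV
  have hin : ∀ i : Nat, (fun (acc : Int) (j : Nat) =>
      if g (i : Int) (j : Int) ≠ g ((i : Int) + 1) (j : Int) then acc + 1 else acc)
      = fun acc (j : Nat) => acc + (if g (i : Int) (j : Int) ≠ g ((i : Int) + 1) (j : Int) then (1:Int) else 0) := by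
    intro i; funext acc j
    by_cases hc : g (i : Int) (j : Int) ≠ g ((i : Int) + 1) (j : Int) <;> simp [hc]
  have hout : (fun (acc : Int) (i : Nat) =>
      (List.range 100).foldl (fun (acc : Int) (j : Nat) =>
        if g (i : Int) (j : Int) ≠ g ((i : Int) + 1) (j : Int) then acc + 1 else acc) acc)
      = fun acc (i : Nat) => acc + ∑ j ∈ Finset.range 100,
          (if g (i : Int) (j : Int) ≠ g ((i : Int) + 1) (j : Int) then (1:Int) else 0) := by
    funext acc i
    rw [hin i, foldl_addf]
  rw [hout, foldl_addf, zero_add]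

lemma merge01 (a b : Int) (ha : a = 0 ∨ a = 1) (hb : b = 0 ∨ b = 1) :
    (if b = 1 ∧ a = 0 then (1 : Int) else 0) + (if a = 1 ∧ b = 0 then 1 else 0)
    = if a ≠ b then 1 else 0 := by
  rcases ha with h | h <;> rcases hb with h' | h' <;> subst h <;> subst h' <;> decide

-- per-cell simplifications of the four directed indicators
lemma aT_right (g : Int → Int → Int) (i j : Nat) (hi : i < 100) (hj : j < 99) :
    aT g 0 1 i j = if g (i : Int) (j : Int) = 1 ∧ g (i : Int) ((j : Int) + 1) = 0 then (1:Int) else 0 := by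
  unfold aT
  simp only [zero_add, add_comm (1:Int)]
  split_ifs with h1 h2 h2 <;> try rfl
  · exact absurd ⟨h1.1, h1.2.2.2.2.2⟩ h2
  · exact absurd ⟨h2.1, by omega, by omega, by omega, by omega, h2.2⟩ h1

lemma aT_right99 (g : Int → Int → Int) (i : Nat) : aT g 0 1 i 99 = 0 := by
  unfold aT; norm_num

lemma aT_left (g : Int → Int → Int) (i j : Nat) (hi : i < 100) (hj : j < 99) :
    aT g 0 (-1) i (j + 1) = if g (i : Int) ((j : Int) + 1) = 1 ∧ g (i : Int) (j : Int) = 0 then (1:Int) else 0 := by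
  unfold aT
  have e : (-1 : Int) + ((j + 1 : Nat) : Int) = (j : Int) := by push_cast; ring
  have e2 : (((j + 1 : Nat)) : Int) = (j : Int) + 1 := by push_cast; ring
  rw [e, e2]
  simp only [zero_add]
  split_ifs with h1 h2 h2 <;> try rfl
  · exact absurd ⟨h1.1, h1.2.2.2.2.2⟩ h2
  · exact absurd ⟨h2.1, by omega, by omega, by omega, by omega, h2.2⟩ h1

lemma aT_left0 (g : Int → Int → Int) (i : Nat) : aT g 0 (-1) i 0 = 0 := by
  unfold aT; norm_num

lemma aT_down (g : Int → Int → Int) (i j : Nat) (hi : i < 99) (hj : j < 100) :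
    aT g 1 0 i j = if g (i : Int) (j : Int) = 1 ∧ g ((i : Int) + 1) (j : Int) = 0 then (1:Int) else 0 := by
  unfold aT
  simp only [zero_add, add_comm (1:Int)]
  split_ifs with h1 h2 h2 <;> try rfl
  · exact absurd ⟨h1.1, h1.2.2.2.2.2⟩ h2
  · exact absurd ⟨h2.1, by omega, by omega, by omega, by omega, h2.2⟩ h1

lemma aT_down99 (g : Int → Int → Int) (j : Nat) : aT g 1 0 99 j = 0 := by
  unfold aT; norm_num

lemma aT_up (g : Int → Int → Int) (i j : Nat) (hi : i < 99) (hj : j < 100) :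
    aT g (-1) 0 (i + 1) j = if g ((i : Int) + 1) (j : Int) = 1 ∧ g (i : Int) (j : Int) = 0 then (1:Int) else 0 := by
  unfold aT
  have e : (-1 : Int) + ((i + 1 : Nat) : Int) = (i : Int) := by push_cast; ring
  have e2 : (((i + 1 : Nat)) : Int) = (i : Int) + 1 := by push_cast; ring
  rw [e, e2]
  simp only [zero_add]
  split_ifs with h1 h2 h2 <;> try rfl
  · exact absurd ⟨h1.1, h1.2.2.2.2.2⟩ h2
  · exact absurd ⟨h2.1, by omega, by omega, by omega, by omega, h2.2⟩ h1

lemma aT_up0 (g : Int → Int → Int) (j : Nat) : aT g (-1) 0 0 j = 0 := by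
  unfold aT; norm_num

lemma count_main (g : Int → Int → Int) (hz : ∀ a b, g a b = 0 ∨ g a b = 1) :
    pvCountA g = pvCountH g + pvCountV g := by
  rw [countA_eq, countH_eq, countV_eq]
  have hsplit : ∀ i ∈ Finset.range 100,
      ∑ j ∈ Finset.range 100,
        (aT g (-1) 0 i j + aT g 1 0 i j + aT g 0 (-1) i j + aT g 0 1 i j)
      = (∑ j ∈ Finset.range 100, (aT g (-1) 0 i j + aT g 1 0 i j))
        + (∑ j ∈ Finset.range 100, (aT g 0 (-1) i j + aT g 0 1 i j)) := by
    intro i _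
    rw [← Finset.sum_add_distrib]
    exact Finset.sum_congr rfl (fun j _ => by ring)
  rw [Finset.sum_congr rfl hsplit, Finset.sum_add_distrib]
  -- horizontal part
  have hH : ∑ i ∈ Finset.range 100, ∑ j ∈ Finset.range 100, (aT g 0 (-1) i j + aT g 0 1 i j)
      = ∑ i ∈ Finset.range 100, ∑ j ∈ Finset.range 99,
          (if g (i : Int) (j : Int) ≠ g (i : Int) ((j : Int) + 1) then (1 : Int) else 0) := by
    refine Finset.sum_congr rfl ?_
    intro i hi
    have hi' : i < 100 := Finset.mem_range.mp hi
    rw [Finset.sum_add_distrib]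
    rw [Finset.sum_range_succ' (fun j => aT g 0 (-1) i j) 99]
    rw [Finset.sum_range_succ (fun j => aT g 0 1 i j) 99]
    rw [aT_left0, aT_right99, add_zero, add_zero, ← Finset.sum_add_distrib]
    refine Finset.sum_congr rfl ?_
    intro j hj
    have hj' : j < 99 := Finset.mem_range.mp hj
    rw [aT_left g i j hi' hj', aT_right g i j hi' hj']
    exact merge01 _ _ (hz _ _) (hz _ _)
  -- vertical part
  have hV : ∑ i ∈ Finset.range 100, ∑ j ∈ Finset.range 100, (aT g (-1) 0 i j + aT g 1 0 i j)
      = ∑ i ∈ Finset.range 99, ∑ j ∈ Finset.range 100,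
          (if g (i : Int) (j : Int) ≠ g ((i : Int) + 1) (j : Int) then (1 : Int) else 0) := by
    have hs : ∀ i ∈ Finset.range 100,
        ∑ j ∈ Finset.range 100, (aT g (-1) 0 i j + aT g 1 0 i j)
        = (∑ j ∈ Finset.range 100, aT g (-1) 0 i j) + ∑ j ∈ Finset.range 100, aT g 1 0 i j :=
      fun i _ => Finset.sum_add_distrib
    rw [Finset.sum_congr rfl hs, Finset.sum_add_distrib]
    rw [Finset.sum_range_succ' (fun i => ∑ j ∈ Finset.range 100, aT g (-1) 0 i j) 99]
    rw [Finset.sum_range_succ (fun i => ∑ j ∈ Finset.range 100, aT g 1 0 i j) 99]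
    have z1 : ∑ j ∈ Finset.range 100, aT g (-1) 0 0 j = 0 :=
      Finset.sum_eq_zero (fun j _ => aT_up0 g j)
    have z2 : ∑ j ∈ Finset.range 100, aT g 1 0 99 j = 0 :=
      Finset.sum_eq_zero (fun j _ => aT_down99 g j)
    rw [z1, z2, add_zero, add_zero, ← Finset.sum_add_distrib]
    refine Finset.sum_congr rfl ?_
    intro i hi
    have hi' : i < 99 := Finset.mem_range.mp hi
    rw [← Finset.sum_add_distrib]
    refine Finset.sum_congr rfl ?_
    intro j hj
    have hj' : j < 100 := Finset.mem_range.mp hj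
    rw [aT_up g i j hi' hj', aT_down g i j hi' hj']
    exact merge01 _ _ (hz _ _) (hz _ _)
  rw [hH, hV]
  ring

-- ===== VERDICT (by name: the statement is the Claim_ definition above) =====
theorem solution_spec : Claim_equal_solution := by
  intro arr _ _
  unfold Spec_solution solution solution_alt
  exact count_main (pvGrid (pvBuild arr)) (pvGrid_zero_one (pvBuild arr) (pvBuild_inv arr))
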